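-- pv_equiv track=rewrite | github.com/sajjadt/uvapy | complete-search/p524.py | prime_ring_formatinos
-- ===== SOURCE A (Python) =====
-- def prime_ring_formatinos(n):
--
--   # Initial Arrangement
--   arrangements = [i+1 for i in range(n)]
--   is_prime = [True if i in set([2, 3, 5, 7, 11, 13, 17, 19, 23, 29, 31]) else False for i in range(32)]
--   numbers_used = [False] * (n+1)
--
--   def form_ring(i):
--     if i == n:
--       if is_prime[arrangements[0] + arrangements[-1]]:
--         yield arrangements
--     else:
--       for j in range(2, n+1):
--         if not numbers_used[j]:
--           total = j + arrangements[i-1]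
--           if is_prime[total] :
--             numbers_used[j] = True
--             arrangements[i] = j
--             yield from form_ring(i+1)
--             numbers_used[j] = False
--
--   numbers_used[1] = True
--   yield from form_ring(1)
-- ===== SOURCE B (Python) =====
-- def prime_ring_formatinos(n):
--   # Iterative explicit-stack DFS replacing A's recursive generator chain.
--   # Like A, yields the SAME working list object for every arrangement found.
--   arrangements = [i + 1 for i in range(n)]
--   primes = {2, 3, 5, 7, 11, 13, 17, 19, 23, 29, 31}
--   is_prime = [i in primes for i in range(32)]
--   numbers_used = [False] * (n + 1)
--   numbers_used[1] = True
--   # frame = [depth i, next candidate j, candidate to un-mark on resume (0 = none)]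
--   stack = [[1, 2, 0]]
--   while stack:
--     frame = stack[-1]
--     i, j, last = frame
--     if last:
--       numbers_used[last] = False
--       frame[2] = 0
--     if i == n:
--       if is_prime[arrangements[0] + arrangements[-1]]:
--         yield arrangements
--       stack.pop()
--       continue
--     while j <= n and (numbers_used[j] or not is_prime[j + arrangements[i - 1]]):
--       j += 1
--     if j > n:
--       stack.pop()
--     else:
--       numbers_used[j] = True
--       arrangements[i] = j
--       frame[1] = j + 1
--       frame[2] = j
--       stack.append([i + 1, 2, 0])
-- ===== Notes on version B (the rewrite author's own statement) =====
-- stated objective: alternative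
-- what changed: A's recursive nest of generators (yield from at every depth) is replaced by a single iterative DFS over an explicit stack of (depth, next-candidate, to-unmark) frames that yields the same shared arrangements buffer in the same order.
import Mathlib
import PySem

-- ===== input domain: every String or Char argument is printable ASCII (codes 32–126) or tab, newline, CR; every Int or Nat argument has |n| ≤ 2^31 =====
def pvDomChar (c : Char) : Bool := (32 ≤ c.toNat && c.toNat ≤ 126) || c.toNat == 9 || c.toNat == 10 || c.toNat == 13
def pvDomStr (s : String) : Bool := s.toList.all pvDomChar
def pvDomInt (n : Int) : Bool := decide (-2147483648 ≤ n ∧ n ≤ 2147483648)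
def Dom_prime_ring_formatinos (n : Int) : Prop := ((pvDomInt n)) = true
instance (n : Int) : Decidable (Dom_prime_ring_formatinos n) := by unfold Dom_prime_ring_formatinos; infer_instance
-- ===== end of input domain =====

-- B replaces A's recursive nest of generators by one explicit-stack iterative DFS over
-- the same shared state (alternative decomposition, same DFS order and same yielded
-- shared buffer).  Both Pythons yield the SAME mutable list each time, so collecting the
-- generator gives `count` references to the final buffer state: both ports return
-- `List.replicate count finalArrangements`.

-- shared literal table: both Pythons build `is_prime` from the same literal prime set
def pvIsPrimeTbl : List Bool :=
  (List.range 32).map (fun i => decide (i ∈ [2, 3, 5, 7, 11, 13, 17, 19, 23, 29, 31]))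

-- is_prime[t] for an Int index t (in range on every admitted input; none would be IndexError)
def pvGetB (l : List Bool) (t : Int) : Bool := (PySem.List.pyGet? l t).getD false

-- ===== PORT A =====
-- state = (arrangements, numbers_used, number of yields of the shared buffer)
def pvFormRing (nn : Nat) : Nat → Nat → (List Int × List Bool × Nat) → (List Int × List Bool × Nat)
  | 0, _, st =>        -- i == n
      if pvGetB pvIsPrimeTbl ((PySem.List.pyGet? st.1 0).getD 0 + (PySem.List.pyGet? st.1 (-1)).getD 0)
      then (st.1, st.2.1, st.2.2 + 1) else st
  | f + 1, i, st =>    -- for j in range(2, n+1)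
      (List.range' 2 (nn - 1)).foldl (fun st j =>
        if st.2.1.getD j false = false then
          if pvGetB pvIsPrimeTbl ((j : Int) + st.1.getD (i - 1) 0) then
            let st2 := pvFormRing nn f (i + 1) (st.1.set i (j : Int), st.2.1.set j true, st.2.2)
            (st2.1, st2.2.1.set j false, st2.2.2)
          else st
        else st) st

def prime_ring_formatinos (n : Int) : List (List Int) :=
  let nn := n.toNat
  let arrangements : List Int := (List.range nn).map (fun i => (i : Int) + 1)
  let numbers_used := (List.replicate (nn + 1) false).set 1 true
  let st := pvFormRing nn (nn - 1) 1 (arrangements, numbers_used, 0)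
  List.replicate st.2.2 st.1

-- ===== PORT B =====
-- the inner `while` scan: first candidate j' ≥ j with not used[j'] and is_prime[j' + arr[i-1]]
def pvScan (nn : Nat) (arr : List Int) (used : List Bool) (i : Nat) (j : Nat) : Option Nat :=
  if _h : j ≤ nn then
    if used.getD j false = false ∧ pvGetB pvIsPrimeTbl ((j : Int) + arr.getD (i - 1) 0) = true
    then some j
    else pvScan nn arr used i (j + 1)
  else none
termination_by nn + 1 - j

-- the `while stack:` loop; a frame is (i, next candidate j, candidate to un-mark, 0 = none);
-- the fuel argument only makes the loop total (the proof shows it is never exhausted)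
def pvLoop (nn : Nat) : Nat → List (Nat × Nat × Nat) → (List Int × List Bool × Nat) →
    Option (List Int × List Bool × Nat)
  | _, [], st => some st
  | 0, _ :: _, _ => none
  | F + 1, (i, j, l) :: rest, st =>
      let used := if l ≠ 0 then st.2.1.set l false else st.2.1
      if i = nn then
        let cnt := if pvGetB pvIsPrimeTbl
            ((PySem.List.pyGet? st.1 0).getD 0 + (PySem.List.pyGet? st.1 (-1)).getD 0)
          then st.2.2 + 1 else st.2.2
        pvLoop nn F rest (st.1, used, cnt)
      else
        match pvScan nn st.1 used i j with
        | none => pvLoop nn F rest (st.1, used, st.2.2)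
        | some j' => pvLoop nn F ((i + 1, 2, 0) :: (i, j' + 1, j') :: rest)
            (st.1.set i (j' : Int), used.set j' true, st.2.2)

-- fuel bound (proved sufficient below): per-frame cost at child fuel f, and total
def pvC (nn : Nat) : Nat → Nat
  | 0 => 1
  | f + 1 => 1 + (nn + 1) * pvC nn f

def pvT (nn f m : Nat) : Nat := (m + 1) * pvC nn f

def prime_ring_formatinos_alt (n : Int) : List (List Int) :=
  let nn := n.toNat
  let arrangements : List Int := (List.range nn).map (fun i => (i : Int) + 1)
  let numbers_used := (List.replicate (nn + 1) false).set 1 true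
  match pvLoop nn (pvT nn (nn - 1) (nn - 1)) [(1, 2, 0)] (arrangements, numbers_used, 0) with
  | some st => List.replicate st.2.2 st.1
  | none => []

-- ===== PRECONDITION & SPEC =====
-- Pre_ excludes exactly the inputs on which the Python A raises IndexError:
-- n < 1 (numbers_used[1] on a too-short list) and n ≥ 17 (is_prime[t] with t ≥ 32
-- is reached during the search; verified for all such n: the table has length 32).
def Pre_prime_ring_formatinos (n : Int) : Prop := 1 ≤ n ∧ n ≤ 16
instance (n : Int) : Decidable (Pre_prime_ring_formatinos n) := by
  unfold Pre_prime_ring_formatinos; infer_instance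

def pvWitness_prime_ring_formatinos : Int := 6

def Spec_prime_ring_formatinos (n : Int) (out : List (List Int)) : Prop :=
  out = prime_ring_formatinos_alt n
instance (n : Int) (out : List (List Int)) : Decidable (Spec_prime_ring_formatinos n out) := by
  unfold Spec_prime_ring_formatinos; infer_instance

-- ===== CLAIM (what is proved, stated in full; the proofs are below) =====
def Claim_equal_prime_ring_formatinos : Prop :=
  ∀ (n : Int), Dom_prime_ring_formatinos n → Pre_prime_ring_formatinos n →
    Spec_prime_ring_formatinos n (prime_ring_formatinos n)

-- ===== LEMMAS AND PROOFS =====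

-- A's loop body (the fold step of pvFormRing at child fuel f), named for the proofs
def pvStepF (nn f i : Nat) (st : List Int × List Bool × Nat) (j : Nat) :
    List Int × List Bool × Nat :=
  if st.2.1.getD j false = false then
    if pvGetB pvIsPrimeTbl ((j : Int) + st.1.getD (i - 1) 0) then
      let st2 := pvFormRing nn f (i + 1) (st.1.set i (j : Int), st.2.1.set j true, st.2.2)
      (st2.1, st2.2.1.set j false, st2.2.2)
    else st
  else st

-- what one resumed B frame computes on the A side: undo `l`, then (at depth nn: the
-- final check; below: A's candidate fold starting at candidate j, children at fuel f-1)
def pvProc (nn f i j l : Nat) (st : List Int × List Bool × Nat) : List Int × List Bool × Nat :=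
  let st' : List Int × List Bool × Nat :=
    if l ≠ 0 then (st.1, st.2.1.set l false, st.2.2) else st
  if i = nn then
    (if pvGetB pvIsPrimeTbl
        ((PySem.List.pyGet? st'.1 0).getD 0 + (PySem.List.pyGet? st'.1 (-1)).getD 0)
     then (st'.1, st'.2.1, st'.2.2 + 1) else st')
  else
    (List.range' j (nn + 1 - j)).foldl (pvStepF nn (f - 1) i) st'

theorem pvC_pos (nn f : Nat) : 1 ≤ pvC nn f := by
  cases f <;> simp [pvC]

theorem pvT_pos (nn f m : Nat) : 1 ≤ pvT nn f m :=
  le_trans (pvC_pos nn f) (Nat.le_mul_of_pos_left _ (by omega))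

theorem pvFormRing_succ (nn g i : Nat) (st : List Int × List Bool × Nat) :
    pvFormRing nn (g + 1) i st = (List.range' 2 (nn - 1)).foldl (pvStepF nn g i) st := rfl

theorem pvFormRing_eq_proc (nn f i : Nat) (st : List Int × List Bool × Nat)
    (h : i + f = nn) : pvFormRing nn f i st = pvProc nn f i 2 0 st := by
  cases f with
  | zero => simp [pvFormRing, pvProc, show i = nn by omega]
  | succ g =>
      rw [pvFormRing_succ]
      unfold pvProc
      rw [if_neg (show ¬ i = nn by omega)]
      have h2 : nn + 1 - 2 = nn - 1 := by omega
      simp [h2]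

theorem pvProc_fold (nn g i j l : Nat) (st : List Int × List Bool × Nat)
    (hne : ¬ i = nn) : pvProc nn (g + 1) i j l st =
      (List.range' j (nn + 1 - j)).foldl (pvStepF nn g i)
        (st.1, (if l ≠ 0 then st.2.1.set l false else st.2.1), st.2.2) := by
  unfold pvProc
  rw [if_neg hne]
  have hst' : (if l ≠ 0 then ((st.1, st.2.1.set l false, st.2.2) :
        List Int × List Bool × Nat) else st) =
      (st.1, (if l ≠ 0 then st.2.1.set l false else st.2.1), st.2.2) := by
    by_cases hl : l ≠ 0 <;> simp [hl]
  rw [hst']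
  rfl

theorem pvStepF_no (nn f i : Nat) (st : List Int × List Bool × Nat) (j : Nat)
    (h : ¬ (st.2.1.getD j false = false ∧
      pvGetB pvIsPrimeTbl ((j : Int) + st.1.getD (i - 1) 0) = true)) :
    pvStepF nn f i st j = st := by
  unfold pvStepF
  split_ifs with h1 h2
  · exact absurd ⟨h1, h2⟩ h
  · rfl
  · rfl

theorem pvStepF_yes (nn f i : Nat) (st : List Int × List Bool × Nat) (j : Nat)
    (h1 : st.2.1.getD j false = false)
    (h2 : pvGetB pvIsPrimeTbl ((j : Int) + st.1.getD (i - 1) 0) = true) :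
    pvStepF nn f i st j =
      ((pvFormRing nn f (i + 1) (st.1.set i (j : Int), st.2.1.set j true, st.2.2)).1,
       (pvFormRing nn f (i + 1) (st.1.set i (j : Int), st.2.1.set j true, st.2.2)).2.1.set j false,
       (pvFormRing nn f (i + 1) (st.1.set i (j : Int), st.2.1.set j true, st.2.2)).2.2) := by
  unfold pvStepF
  rw [if_pos h1, if_pos h2]

theorem pvScan_none (nn : Nat) (arr : List Int) (used : List Bool) (i j : Nat)
    (h : nn < j) : pvScan nn arr used i j = none := by
  rw [pvScan]
  rw [dif_neg (by omega)]

theorem pvScan_some (nn : Nat) (arr : List Int) (used : List Bool) (i j j' : Nat)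
    (h : pvScan nn arr used i j = some j') :
    (j ≤ j' ∧ j' ≤ nn) ∧
      (used.getD j' false = false ∧
        pvGetB pvIsPrimeTbl ((j' : Int) + arr.getD (i - 1) 0) = true) := by
  by_cases hj : j ≤ nn
  · rw [pvScan, dif_pos hj] at h
    by_cases hc : used.getD j false = false ∧
        pvGetB pvIsPrimeTbl ((j : Int) + arr.getD (i - 1) 0) = true
    · rw [if_pos hc] at h
      cases h
      exact ⟨⟨le_refl _, hj⟩, hc⟩
    · rw [if_neg hc] at h
      have := pvScan_some nn arr used i (j + 1) j' h
      exact ⟨⟨by omega, this.1.2⟩, this.2⟩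
  · rw [pvScan_none nn arr used i j (by omega)] at h
    cases h
termination_by nn + 1 - j

theorem pvFold_none (nn f i : Nat) : ∀ (m : Nat) (j : Nat) (st : List Int × List Bool × Nat),
    nn + 1 - j ≤ m → pvScan nn st.1 st.2.1 i j = none →
    (List.range' j (nn + 1 - j)).foldl (pvStepF nn f i) st = st := by
  intro m
  induction m with
  | zero =>
      intro j st hm _
      rw [show nn + 1 - j = 0 by omega]
      rfl
  | succ m ih =>
      intro j st hm hs
      by_cases hj : j ≤ nn
      · rw [pvScan, dif_pos hj] at hs
        by_cases hc : st.2.1.getD j false = false ∧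
            pvGetB pvIsPrimeTbl ((j : Int) + st.1.getD (i - 1) 0) = true
        · rw [if_pos hc] at hs
          cases hs
        · rw [if_neg hc] at hs
          have hr : List.range' j (nn + 1 - j) = j :: List.range' (j + 1) (nn + 1 - (j + 1)) := by
            rw [show nn + 1 - j = (nn + 1 - (j + 1)) + 1 by omega, List.range'_succ]
          rw [hr, List.foldl_cons, pvStepF_no nn f i st j hc]
          exact ih (j + 1) st (by omega) hs
      · rw [show nn + 1 - j = 0 by omega]
        rfl

theorem pvFold_some (nn f i : Nat) : ∀ (m : Nat) (j j' : Nat) (st : List Int × List Bool × Nat),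
    nn + 1 - j ≤ m → pvScan nn st.1 st.2.1 i j = some j' →
    (List.range' j (nn + 1 - j)).foldl (pvStepF nn f i) st =
      (List.range' (j' + 1) (nn + 1 - (j' + 1))).foldl (pvStepF nn f i) (pvStepF nn f i st j') := by
  intro m
  induction m with
  | zero =>
      intro j j' st hm hs
      rw [pvScan_none nn st.1 st.2.1 i j (by omega)] at hs
      cases hs
  | succ m ih =>
      intro j j' st hm hs
      by_cases hj : j ≤ nn
      · have hr : List.range' j (nn + 1 - j) = j :: List.range' (j + 1) (nn + 1 - (j + 1)) := by
          rw [show nn + 1 - j = (nn + 1 - (j + 1)) + 1 by omega, List.range'_succ]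
        rw [pvScan, dif_pos hj] at hs
        by_cases hc : st.2.1.getD j false = false ∧
            pvGetB pvIsPrimeTbl ((j : Int) + st.1.getD (i - 1) 0) = true
        · rw [if_pos hc] at hs
          cases hs
          rw [hr, List.foldl_cons]
        · rw [if_neg hc] at hs
          rw [hr, List.foldl_cons, pvStepF_no nn f i st j hc]
          exact ih (j + 1) j' st (by omega) hs
      · rw [pvScan_none nn st.1 st.2.1 i j (by omega)] at hs
        cases hs

theorem pvLoop_mono (nn : Nat) : ∀ (F F' : Nat) (s : List (Nat × Nat × Nat))
    (st r : List Int × List Bool × Nat), F ≤ F' → pvLoop nn F s st = some r →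
    pvLoop nn F' s st = some r := by
  intro F
  induction F with
  | zero =>
      intro F' s st r _ h
      cases s with
      | nil => simpa [pvLoop] using h
      | cons a s => simp [pvLoop] at h
  | succ F ih =>
      intro F' s st r hle h
      cases s with
      | nil => simpa [pvLoop] using h
      | cons fr s =>
          obtain ⟨i, j, l⟩ := fr
          obtain ⟨F', rfl⟩ : ∃ k, F' = k + 1 := ⟨F' - 1, by omega⟩
          rw [pvLoop] at h
          rw [pvLoop]
          simp only at h ⊢
          by_cases hi : i = nn
          · rw [if_pos hi] at h ⊢
            exact ih F' _ _ _ (by omega) h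
          · rw [if_neg hi] at h ⊢
            cases hscan : pvScan nn st.1 (if l ≠ 0 then st.2.1.set l false else st.2.1) i j with
            | none =>
                rw [hscan] at h
                exact ih F' _ _ _ (by omega) h
            | some j' =>
                rw [hscan] at h
                exact ih F' _ _ _ (by omega) h

theorem pvProc_base (nn j l : Nat) (st : List Int × List Bool × Nat) :
    pvProc nn 0 nn j l st =
      (st.1, (if l ≠ 0 then st.2.1.set l false else st.2.1),
       if pvGetB pvIsPrimeTbl
           ((PySem.List.pyGet? st.1 0).getD 0 + (PySem.List.pyGet? st.1 (-1)).getD 0)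
         then st.2.2 + 1 else st.2.2) := by
  unfold pvProc
  rw [if_pos rfl]
  by_cases hl : l ≠ 0 <;>
    by_cases hp : pvGetB pvIsPrimeTbl
      ((PySem.List.pyGet? st.1 0).getD 0 + (PySem.List.pyGet? st.1 (-1)).getD 0) = true <;>
    simp [hl, hp]

-- the simulation: one B frame (i, j, l), given enough fuel, performs exactly pvProc
theorem pvLoop_sim (nn : Nat) : ∀ (f : Nat), ∀ (m : Nat), ∀ (i j l F : Nat)
    (st r : List Int × List Bool × Nat) (rest : List (Nat × Nat × Nat)),
    i + f = nn → 2 ≤ j → nn + 1 - j ≤ m →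
    pvLoop nn F rest (pvProc nn f i j l st) = some r →
    pvLoop nn (F + pvT nn f m) ((i, j, l) :: rest) st = some r := by
  intro f
  induction f with
  | zero =>
      intro m i j l F st r rest hi _ _ h
      subst hi
      rw [Nat.add_zero] at h
      rw [Nat.add_zero]
      rw [pvProc_base] at h
      rw [show F + pvT i 0 m = (F + m) + 1 by simp only [pvT, pvC]; omega]
      rw [pvLoop]
      simp only [eq_self_iff_true, if_true]
      exact pvLoop_mono i F (F + m) _ _ _ (by omega) h
  | succ g ihf =>
      intro m
      induction m with
      | zero =>
          intro i j l F st r rest hi hj2 hm h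
          have hne : ¬ i = nn := by omega
          have hT1 : 1 ≤ pvT nn (g + 1) 0 := pvT_pos nn (g + 1) 0
          obtain ⟨K, hK⟩ : ∃ K, F + pvT nn (g + 1) 0 = K + 1 :=
            ⟨F + pvT nn (g + 1) 0 - 1, by omega⟩
          rw [hK, pvLoop]
          simp only [if_neg hne]
          cases hscan : pvScan nn st.1 (if l ≠ 0 then st.2.1.set l false else st.2.1) i j with
          | none =>
              have hv : pvProc nn (g + 1) i j l st =
                  (st.1, (if l ≠ 0 then st.2.1.set l false else st.2.1), st.2.2) := by
                rw [pvProc_fold nn g i j l st hne]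
                exact pvFold_none nn g i 0 j _ (by omega) hscan
              rw [hv] at h
              exact pvLoop_mono nn F K _ _ _ (by omega) h
          | some j' =>
              rw [pvScan_none nn st.1 _ i j (by omega)] at hscan
              cases hscan
      | succ m ihm =>
          intro i j l F st r rest hi hj2 hm h
          have hT1 : 1 ≤ pvT nn (g + 1) (m + 1) := pvT_pos nn (g + 1) (m + 1)
          obtain ⟨K, hK⟩ : ∃ K, F + pvT nn (g + 1) (m + 1) = K + 1 :=
            ⟨F + pvT nn (g + 1) (m + 1) - 1, by omega⟩
          rw [hK, pvLoop]
          have hne : ¬ i = nn := by omega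
          simp only [if_neg hne]
          cases hscan : pvScan nn st.1 (if l ≠ 0 then st.2.1.set l false else st.2.1) i j with
          | none =>
              have hv : pvProc nn (g + 1) i j l st =
                  (st.1, (if l ≠ 0 then st.2.1.set l false else st.2.1), st.2.2) := by
                rw [pvProc_fold nn g i j l st hne]
                exact pvFold_none nn g i (m + 1) j _ hm hscan
              rw [hv] at h
              exact pvLoop_mono nn F K _ _ _ (by omega) h
          | some j' =>
              have hsc := pvScan_some nn st.1 _ i j j' hscan
              obtain ⟨⟨hjj', hj'nn⟩, hc1, hc2⟩ := hsc
              have hval : pvProc nn (g + 1) i j l st =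
                  pvProc nn (g + 1) i (j' + 1) j'
                    (pvFormRing nn g (i + 1)
                      (st.1.set i (j' : Int),
                       (if l ≠ 0 then st.2.1.set l false else st.2.1).set j' true, st.2.2)) := by
                rw [pvProc_fold nn g i j l st hne,
                  pvFold_some nn g i (m + 1) j j' _ hm hscan,
                  pvStepF_yes nn g i
                    ((st.1, (if l ≠ 0 then st.2.1.set l false else st.2.1), st.2.2) :
                      List Int × List Bool × Nat) j' hc1 hc2,
                  pvProc_fold nn g i (j' + 1) j' _ hne]
                rw [if_pos (show j' ≠ 0 by omega)]
              rw [hval] at h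
              have hmle : nn + 1 - (j' + 1) ≤ m := by omega
              have h1 := ihm i (j' + 1) j' F
                (pvFormRing nn g (i + 1)
                  (st.1.set i (j' : Int),
                   (if l ≠ 0 then st.2.1.set l false else st.2.1).set j' true, st.2.2))
                r rest hi (by omega) hmle h
              rw [pvFormRing_eq_proc nn g (i + 1) _ (by omega)] at h1
              have h2 := ihf (nn - 1) (i + 1) 2 0 (F + pvT nn (g + 1) m)
                (st.1.set i (j' : Int),
                 (if l ≠ 0 then st.2.1.set l false else st.2.1).set j' true, st.2.2) r
                ((i, j' + 1, j') :: rest) (by omega) (by omega) (by omega) h1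
              refine pvLoop_mono nn _ K _ _ _ ?_ h2
              have hc : pvC nn (g + 1) = 1 + (nn + 1) * pvC nn g := rfl
              have e3 : pvT nn g (nn - 1) = nn * pvC nn g := by
                unfold pvT
                rw [show nn - 1 + 1 = nn by omega]
              have e1 : pvT nn (g + 1) (m + 1) = pvT nn (g + 1) m + pvC nn (g + 1) := by
                unfold pvT
                ring
              have hmul : nn * pvC nn g ≤ (nn + 1) * pvC nn g :=
                Nat.mul_le_mul_right _ (by omega)
              omega

-- ===== VERDICT (by name: the statement is the Claim_ definition above) =====
theorem prime_ring_formatinos_spec : Claim_equal_prime_ring_formatinos := by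
  intro n _ hpre
  obtain ⟨h1, _⟩ := hpre
  have hnn1 : 1 ≤ n.toNat := by omega
  have hB : pvLoop n.toNat (pvT n.toNat (n.toNat - 1) (n.toNat - 1)) [(1, 2, 0)]
      ((List.range n.toNat).map (fun i => (i : Int) + 1),
       (List.replicate (n.toNat + 1) false).set 1 true, 0) =
      some (pvProc n.toNat (n.toNat - 1) 1 2 0
        ((List.range n.toNat).map (fun i => (i : Int) + 1),
         (List.replicate (n.toNat + 1) false).set 1 true, 0)) := by
    have := pvLoop_sim n.toNat (n.toNat - 1) (n.toNat - 1) 1 2 0 0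
      ((List.range n.toNat).map (fun i => (i : Int) + 1),
       (List.replicate (n.toNat + 1) false).set 1 true, 0)
      (pvProc n.toNat (n.toNat - 1) 1 2 0
        ((List.range n.toNat).map (fun i => (i : Int) + 1),
         (List.replicate (n.toNat + 1) false).set 1 true, 0))
      [] (by omega) (by omega) (by omega) (by rw [pvLoop])
    rw [Nat.zero_add] at this
    exact this
  unfold Spec_prime_ring_formatinos
  show (List.replicate (pvFormRing n.toNat (n.toNat - 1) 1
        ((List.range n.toNat).map (fun i => (i : Int) + 1),
         (List.replicate (n.toNat + 1) false).set 1 true, 0)).2.2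
      (pvFormRing n.toNat (n.toNat - 1) 1
        ((List.range n.toNat).map (fun i => (i : Int) + 1),
         (List.replicate (n.toNat + 1) false).set 1 true, 0)).1) =
    (match pvLoop n.toNat (pvT n.toNat (n.toNat - 1) (n.toNat - 1)) [(1, 2, 0)]
        ((List.range n.toNat).map (fun i => (i : Int) + 1),
         (List.replicate (n.toNat + 1) false).set 1 true, 0) with
     | some st => List.replicate st.2.2 st.1
     | none => [])
  rw [hB, pvFormRing_eq_proc n.toNat (n.toNat - 1) 1 _ (by omega)]
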